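-- pv_equiv track=rewrite | github.com/SybelBlue/SybelBlue | main/DungeonMaker.py | make_boundaries
-- ===== SOURCE A (Python) =====
-- from enum import IntEnum
--
-- class Block(IntEnum):
--     null = -2
--     door = -1
--     empty = 0
--     wall = 1
--
-- def neighbors(empty_map, i, j):
--     out = []
--
--     for x in range(i - 1, min(i + 2, len(empty_map))):
--         for y in range(j - 1, min(j + 2, len(empty_map[i]))):
--             out.append(empty_map[x][y])
--
--     out.remove(empty_map[i][j])
--
--     return out
--
-- def make_boundaries(empty_map):
--     for i in range(len(empty_map)):
--         for j in range(len(empty_map[i])):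
--             if empty_map[i][j] != Block.empty:
--                 continue
--
--             if i in [0, len(empty_map) - 1]:
--                 empty_map[i][j] = Block.wall
--             elif j in [0, len(empty_map[i]) - 1]:
--                 empty_map[i][j] = Block.wall
--             elif Block.null in neighbors(empty_map, i, j):
--                 empty_map[i][j] = Block.wall
--
--     return empty_map
-- ===== SOURCE B (Python) =====
-- def make_boundaries(empty_map):
--     n = len(empty_map)
--     # Pass 1: empty cells on the grid's first/last row or their row's first/last column become walls.
--     for i in range(n):
--         row = empty_map[i]
--         m = len(row)
--         for j in range(m):
--             if row[j] == 0 and (i == 0 or i == n - 1 or j == 0 or j == m - 1):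
--                 row[j] = 1
--     # Pass 2: collect the null cells once, then let each null turn its empty interior neighbours into walls.
--     nulls = [(i, j) for i in range(n) for j in range(len(empty_map[i])) if empty_map[i][j] == -2]
--     for i, j in nulls:
--         for x in range(max(i - 1, 0), min(i + 2, n)):
--             rx = empty_map[x]
--             m = len(rx)
--             for y in range(max(j - 1, 0), min(j + 2, m)):
--                 if rx[y] == 0 and 0 < x < n - 1 and 0 < y < m - 1:
--                     rx[y] = 1
--     return empty_map
-- ===== Notes on version B (the rewrite author's own statement) =====
-- stated objective: faster
-- what changed: Inverts the traversal: instead of building and searching a 9-element neighbour list per empty cell, B marks edge empties in one plain pass, then collects the null cells once and scatters walls from each null to its empty interior neighbours (work proportional to cells + 9*nulls).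
import Mathlib
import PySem

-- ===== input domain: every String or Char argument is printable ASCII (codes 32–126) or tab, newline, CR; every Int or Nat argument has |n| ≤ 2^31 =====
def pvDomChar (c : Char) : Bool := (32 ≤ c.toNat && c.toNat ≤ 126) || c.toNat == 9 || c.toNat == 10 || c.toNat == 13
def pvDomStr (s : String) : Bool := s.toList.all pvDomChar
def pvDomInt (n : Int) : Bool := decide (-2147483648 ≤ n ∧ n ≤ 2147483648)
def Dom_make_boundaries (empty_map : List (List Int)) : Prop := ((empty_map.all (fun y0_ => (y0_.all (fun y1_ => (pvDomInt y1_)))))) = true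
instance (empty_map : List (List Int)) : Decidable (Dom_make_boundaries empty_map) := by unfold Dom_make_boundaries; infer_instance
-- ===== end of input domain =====

-- B replaces A's per-empty-cell 3x3 neighbour-list scan by an edge pass plus wall-scattering from
-- the null cells collected once (measured faster by a constant factor in a timing run). Both
-- Pythons mutate the argument in place and return it; the theorems are about the returned grid
-- (the mutation is the same object).

-- shared cell primitives (Python's g[i], g[i][j], g[i][j] = v at nonnegative in-range indices;
-- exact at every call site below: both programs only read/write indices their range loops produced)
def gRow (g : List (List Int)) (i : Nat) : List Int := g.getD i []
def gV (g : List (List Int)) (i j : Nat) : Int := (gRow g i).getD j 0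
def gSet (g : List (List Int)) (i j : Nat) (v : Int) : List (List Int) := g.set i ((gRow g i).set j v)

-- ===== PORT A =====
-- neighbors(empty_map, i, j): only called with 1 ≤ i ≤ len-2, 1 ≤ j ≤ len(row i)-2, so the Nat
-- subtractions are exact; the getD-0 reads stand for accesses that Python performs without
-- IndexError exactly on Pre_ (outside Pre_ Python raises, which Pre_ excludes).
def neighbors (g : List (List Int)) (i j : Nat) : List Int :=
  let out := (List.range' (i - 1) (min (i + 2) g.length - (i - 1))).foldl
    (fun out x => (List.range' (j - 1) (min (j + 2) (gRow g i).length - (j - 1))).foldl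
      (fun out y => out ++ [gV g x y]) out) []
  (PySem.List.remove? out (gV g i j)).getD []

-- the body of A's inner loop, verbatim branch order
def bodyA (g : List (List Int)) (i j : Nat) : List (List Int) :=
  if gV g i j ≠ 0 then g
  else if i = 0 ∨ i = g.length - 1 then gSet g i j 1
  else if j = 0 ∨ j = (gRow g i).length - 1 then gSet g i j 1
  else if (-2 : Int) ∈ neighbors g i j then gSet g i j 1
  else g

def make_boundaries (empty_map : List (List Int)) : List (List Int) :=
  (List.range empty_map.length).foldl (fun g i =>
    (List.range (gRow g i).length).foldl (fun h j => bodyA h i j) g) empty_map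

-- ===== PORT B =====
-- pass 1 inner body: edge empties become walls
def bodyB1 (n m : Nat) (g : List (List Int)) (i j : Nat) : List (List Int) :=
  if gV g i j = 0 ∧ (i = 0 ∨ i = n - 1 ∨ j = 0 ∨ j = m - 1) then gSet g i j 1 else g

-- pass 2 inner body: an empty interior cell next to a null becomes a wall
def bodyB2 (n m : Nat) (g : List (List Int)) (x y : Nat) : List (List Int) :=
  if gV g x y = 0 ∧ 0 < x ∧ x < n - 1 ∧ 0 < y ∧ y < m - 1 then gSet g x y 1 else g

-- scatter from one null cell (i, j): its 3x3 window clipped to the grid (rx = empty_map[x], m = len(rx))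
def scatter (n : Nat) (g : List (List Int)) (i j : Nat) : List (List Int) :=
  (List.range' (i - 1) (min (i + 2) n - (i - 1))).foldl (fun g x =>
    (List.range' (j - 1) (min (j + 2) (gRow g x).length - (j - 1))).foldl
      (fun h y => bodyB2 n (gRow g x).length h x y) g) g

def make_boundaries_alt (empty_map : List (List Int)) : List (List Int) :=
  let n := empty_map.length
  let g1 := (List.range n).foldl (fun g i =>
    (List.range (gRow g i).length).foldl (fun h j => bodyB1 n (gRow g i).length h i j) g) empty_map
  let nulls := (List.range n).flatMap (fun i =>
    (List.range (gRow g1 i).length).filterMap (fun j => if gV g1 i j = -2 then some (i, j) else none))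
  nulls.foldl (fun g p => scatter n g p.1 p.2) g1

-- ===== PRECONDITION & SPEC =====
-- Pre_ is exactly the set of inputs on which Python A returns: A raises IndexError iff some empty
-- interior cell has a neighbouring row too short for its 3x3 window.
def Pre_make_boundaries (empty_map : List (List Int)) : Prop :=
  ∀ i < empty_map.length, ∀ j < (gRow empty_map i).length,
    (0 < i ∧ i < empty_map.length - 1 ∧ 0 < j ∧ j < (gRow empty_map i).length - 1 ∧
     gV empty_map i j = 0) →
    j + 2 ≤ (gRow empty_map (i - 1)).length ∧ j + 2 ≤ (gRow empty_map (i + 1)).length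
instance (empty_map : List (List Int)) : Decidable (Pre_make_boundaries empty_map) := by
  unfold Pre_make_boundaries; infer_instance

def pvWitness_make_boundaries : List (List Int) := [[0, 0, 0], [0, -2, 0], [0, 0, 0]]

def Spec_make_boundaries (empty_map : List (List Int)) (out : List (List Int)) : Prop := out = make_boundaries_alt empty_map
instance (empty_map : List (List Int)) (out : List (List Int)) : Decidable (Spec_make_boundaries empty_map out) := by unfold Spec_make_boundaries; infer_instance

-- ===== CLAIM (what is proved, stated in full; the proofs are below) =====
def Claim_equal_make_boundaries : Prop := ∀ (empty_map : List (List Int)), Dom_make_boundaries empty_map → Pre_make_boundaries empty_map → Spec_make_boundaries empty_map (make_boundaries empty_map)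


-- ===== LEMMAS AND PROOFS =====

-- row length, seen through gRow
def gL (g : List (List Int)) (i : Nat) : Nat := (gRow g i).length

-- the per-cell answer both programs compute, read off the original grid: is one of the
-- (up to) eight neighbours or the cell itself a null in the original grid?
abbrev NearNull (o : List (List Int)) (i j : Nat) : Prop :=
  gV o (i-1) (j-1) = -2 ∨ gV o (i-1) j = -2 ∨ gV o (i-1) (j+1) = -2 ∨
  gV o i (j-1) = -2 ∨ gV o i j = -2 ∨ gV o i (j+1) = -2 ∨
  gV o (i+1) (j-1) = -2 ∨ gV o (i+1) j = -2 ∨ gV o (i+1) (j+1) = -2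

def outVal (o : List (List Int)) (i j : Nat) : Int :=
  if gV o i j ≠ 0 then gV o i j
  else if i = 0 ∨ i = o.length - 1 ∨ j = 0 ∨ j = gL o i - 1 then 1
  else if NearNull o i j then 1 else 0

-- cell and shape facts about gSet / out-of-range reads
theorem length_gSet (g : List (List Int)) (i j : Nat) (v : Int) :
    (gSet g i j v).length = g.length := by simp [gSet]

theorem getD_set_row (l : List (List Int)) (i x : Nat) (r : List Int) :
    (l.set i r).getD x [] = if i = x ∧ i < l.length then r else l.getD x [] := by
  rw [List.getD_eq_getElem?_getD, List.getElem?_set]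
  by_cases h1 : i = x
  · subst h1
    by_cases h2 : i < l.length
    · rw [if_pos rfl, if_pos h2, if_pos ⟨rfl, h2⟩, Option.getD_some]
    · rw [if_pos rfl, if_neg h2, if_neg (by tauto)]
      have : l.getD i [] = [] := List.getD_eq_default _ _ (by omega)
      rw [this]
      rfl
  · rw [if_neg h1, if_neg (by tauto), ← List.getD_eq_getElem?_getD]

theorem getD_set_cell (l : List Int) (j y : Nat) (v : Int) :
    (l.set j v).getD y 0 = if j = y ∧ j < l.length then v else l.getD y 0 := by
  rw [List.getD_eq_getElem?_getD, List.getElem?_set]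
  by_cases h1 : j = y
  · subst h1
    by_cases h2 : j < l.length
    · rw [if_pos rfl, if_pos h2, if_pos ⟨rfl, h2⟩, Option.getD_some]
    · rw [if_pos rfl, if_neg h2, if_neg (by tauto)]
      have : l.getD j 0 = 0 := List.getD_eq_default _ _ (by omega)
      rw [this]
      rfl
  · rw [if_neg h1, if_neg (by tauto), ← List.getD_eq_getElem?_getD]

theorem gL_gSet (g : List (List Int)) (i j : Nat) (v : Int) (x : Nat) :
    gL (gSet g i j v) x = gL g x := by
  simp only [gL, gSet, gRow]
  rw [getD_set_row]
  split_ifs with h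
  · obtain ⟨rfl, -⟩ := h
    simp
  · rfl

theorem gV_gSet (g : List (List Int)) (i j : Nat) (v : Int) (x y : Nat)
    (hi : i < g.length) (hj : j < gL g i) :
    gV (gSet g i j v) x y = if x = i ∧ y = j then v else gV g x y := by
  have hj' : j < (g.getD i []).length := hj
  simp only [gV, gSet, gRow]
  rw [getD_set_row]
  by_cases h : i = x
  · subst h
    rw [if_pos ⟨rfl, hi⟩, getD_set_cell]
    by_cases hy : y = j
    · subst hy
      rw [if_pos ⟨rfl, hj'⟩, if_pos ⟨rfl, rfl⟩]
    · rw [if_neg (fun hc => hy hc.1.symm), if_neg (fun hc => hy hc.2)]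
  · rw [if_neg (fun hc => h hc.1), if_neg (fun hc => h hc.1.symm)]

theorem gV_oob (g : List (List Int)) (x y : Nat) (h : gL g x ≤ y) : gV g x y = 0 := by
  simp only [gV, gRow]
  exact List.getD_eq_default _ _ h

theorem gV_ne_zero_bounds (g : List (List Int)) (x y : Nat) (h : gV g x y ≠ 0) :
    x < g.length ∧ y < gL g x := by
  refine ⟨?_, ?_⟩
  · by_contra hx
    apply h
    simp only [gV, gRow]
    have : g.getD x [] = [] := List.getD_eq_default _ _ (by omega)
    rw [this]
    rfl
  · by_contra hy
    exact h (gV_oob g x y (by omega))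

-- grid description: shape of o, values f on the in-bounds cells
def Desc (o g : List (List Int)) (f : Nat → Nat → Int) : Prop :=
  g.length = o.length ∧ (∀ x, gL g x = gL o x) ∧
  ∀ x y, x < o.length → y < gL o x → gV g x y = f x y

theorem Desc_congr {o g : List (List Int)} {f f' : Nat → Nat → Int} (h : Desc o g f)
    (hf : ∀ x y, x < o.length → y < gL o x → f x y = f' x y) : Desc o g f' :=
  ⟨h.1, h.2.1, fun x y hx hy => (h.2.2 x y hx hy).trans (hf x y hx hy)⟩

theorem Desc_init (o : List (List Int)) : Desc o o (fun x y => gV o x y) :=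
  ⟨rfl, fun _ => rfl, fun _ _ _ _ => rfl⟩

theorem Desc_gSet {o g : List (List Int)} {f : Nat → Nat → Int} (h : Desc o g f)
    (i j : Nat) (v : Int) (hi : i < o.length) (hj : j < gL o i) :
    Desc o (gSet g i j v) (fun x y => if x = i ∧ y = j then v else f x y) := by
  have hi' : i < g.length := by rw [h.1]; exact hi
  have hj' : j < gL g i := by rw [h.2.1 i]; exact hj
  refine ⟨by rw [length_gSet, h.1], fun x => by rw [gL_gSet, h.2.1], ?_⟩
  intro x y hx hy
  rw [gV_gSet g i j v x y hi' hj']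
  dsimp only
  split_ifs with hxy
  · rfl
  · exact h.2.2 x y hx hy

theorem Desc_unique (o g h : List (List Int)) (f : Nat → Nat → Int)
    (hg : Desc o g f) (hh : Desc o h f) : g = h := by
  apply List.ext_getElem (by rw [hg.1, hh.1])
  intro x hx1 hx2
  have hxo : x < o.length := by rw [← hg.1]; exact hx1
  have hlg : g[x].length = gL o x := by
    have := hg.2.1 x
    unfold gL gRow at this ⊢
    rwa [List.getD_eq_getElem _ _ hx1] at this
  have hlh : h[x].length = gL o x := by
    have := hh.2.1 x
    unfold gL gRow at this ⊢
    rwa [List.getD_eq_getElem _ _ hx2] at this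
  apply List.ext_getElem (by rw [hlg, hlh])
  intro y hy1 hy2
  have hyo : y < gL o x := by rw [← hlg]; exact hy1
  have e1 : g[x][y] = gV g x y := by
    unfold gV gRow
    rw [List.getD_eq_getElem _ _ hx1, List.getD_eq_getElem _ _ hy1]
  have e2 : h[x][y] = gV h x y := by
    unfold gV gRow
    rw [List.getD_eq_getElem _ _ hx2, List.getD_eq_getElem _ _ hy2]
  rw [e1, e2, hg.2.2 x y hxo hyo, hh.2.2 x y hxo hyo]

-- generic loop invariants for foldl over ranges / lists
theorem foldl_range'_inv {G : Type} (f : G → Nat → G) (P : Nat → G → Prop) :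
    ∀ (len s : Nat) (g : G), P s g →
      (∀ k g', s ≤ k → k < s + len → P k g' → P (k + 1) (f g' k)) →
      P (s + len) ((List.range' s len).foldl f g) := by
  intro len
  induction len with
  | zero => intro s g h0 _; simpa using h0
  | succ m ih =>
      intro s g h0 hstep
      rw [List.range'_succ]
      simp only [List.foldl_cons]
      have h1 : P (s + 1) (f g s) := hstep s g le_rfl (by omega) h0
      have := ih (s + 1) (f g s) h1 (fun k g' hk1 hk2 => hstep k g' (by omega) (by omega))
      have e : s + 1 + m = s + (m + 1) := by omega
      rwa [e] at this

theorem foldl_range_inv {G : Type} (f : G → Nat → G) (P : Nat → G → Prop)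
    (len : Nat) (g : G) (h0 : P 0 g)
    (hstep : ∀ k g', k < len → P k g' → P (k + 1) (f g' k)) :
    P len ((List.range len).foldl f g) := by
  rw [List.range_eq_range']
  have := foldl_range'_inv f P len 0 g h0 (fun k g' _ hk2 => hstep k g' (by omega))
  simpa using this

theorem foldl_mem_inv {α G : Type} (full : List α) (f : G → α → G) (P : List α → G → Prop)
    (hstep : ∀ done x g, x ∈ full → P done g → P (done ++ [x]) (f g x)) :
    ∀ (l done : List α) (g : G), (∀ x ∈ l, x ∈ full) → P done g →
      P (done ++ l) (l.foldl f g) := by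
  intro l
  induction l with
  | nil => intro done g _ h0; simpa using h0
  | cons x xs ih =>
      intro done g hmem h0
      simp only [List.foldl_cons]
      have h1 := hstep done x g (hmem x (by simp)) h0
      have := ih (done ++ [x]) (f g x) (fun a ha => hmem a (by simp [ha])) h1
      simpa using this

-- value functions
abbrev interiorP (o : List (List Int)) (x y : Nat) : Prop :=
  0 < x ∧ x < o.length - 1 ∧ 0 < y ∧ y < gL o x - 1

theorem outVal_of_ne (o : List (List Int)) (i j : Nat) (h : gV o i j ≠ 0) :
    outVal o i j = gV o i j := by unfold outVal; rw [if_pos h]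

theorem outVal_edge (o : List (List Int)) (i j : Nat) (h0 : gV o i j = 0)
    (he : i = 0 ∨ i = o.length - 1 ∨ j = 0 ∨ j = gL o i - 1) : outVal o i j = 1 := by
  unfold outVal
  rw [if_neg (by simp [h0]), if_pos he]

theorem outVal_inner (o : List (List Int)) (i j : Nat) (h0 : gV o i j = 0)
    (he : ¬(i = 0 ∨ i = o.length - 1 ∨ j = 0 ∨ j = gL o i - 1)) :
    outVal o i j = if NearNull o i j then 1 else 0 := by
  unfold outVal
  rw [if_neg (by simp [h0]), if_neg he]

theorem outVal_neg2 (o : List (List Int)) (x y : Nat) :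
    outVal o x y = -2 ↔ gV o x y = -2 := by
  unfold outVal; split_ifs <;> simp_all

def p1Val (o : List (List Int)) (x y : Nat) : Int :=
  if gV o x y = 0 ∧ (x = 0 ∨ x = o.length - 1 ∨ y = 0 ∨ y = gL o x - 1) then 1 else gV o x y

theorem p1Val_neg2 (o : List (List Int)) (x y : Nat) :
    p1Val o x y = -2 ↔ gV o x y = -2 := by
  unfold p1Val; split_ifs <;> simp_all

theorem p1Val_interior (o : List (List Int)) (x y : Nat) (h : interiorP o x y) :
    p1Val o x y = gV o x y := by
  unfold p1Val
  rw [if_neg (by rintro ⟨-, h2⟩; omega)]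

-- row-major mixed description: processed cells show F, the rest the original
def mixRM (F G : Nat → Nat → Int) (i j x y : Nat) : Int :=
  if x < i ∨ (x = i ∧ y < j) then F x y else G x y

theorem mixRM_self (F G : Nat → Nat → Int) (i j : Nat) : mixRM F G i j i j = G i j := by
  unfold mixRM; rw [if_neg (by omega)]

theorem mixRM_succ_self (F G : Nat → Nat → Int) (i j : Nat) :
    mixRM F G i (j + 1) i j = F i j := by
  unfold mixRM; rw [if_pos (by omega)]

theorem mixRM_succ_ne (F G : Nat → Nat → Int) (i j x y : Nat) (h : ¬(x = i ∧ y = j)) :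
    mixRM F G i (j + 1) x y = mixRM F G i j x y := by
  unfold mixRM
  by_cases h1 : x < i ∨ (x = i ∧ y < j + 1) <;> by_cases h2 : x < i ∨ (x = i ∧ y < j) <;>
    simp only [h1, h2, if_pos, if_true, if_false] <;> first | rfl | omega

theorem mixRM_zero (F G : Nat → Nat → Int) (x y : Nat) : mixRM F G 0 0 x y = G x y := by
  unfold mixRM; rw [if_neg (by omega)]

-- a full row-major sweep of a per-cell body establishes F on the whole grid
theorem sweep_desc (o : List (List Int)) (F : Nat → Nat → Int)
    (body : Nat → Nat → List (List Int) → Nat → List (List Int))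
    (hstep : ∀ i j g, i < o.length → j < gL o i → Desc o g (mixRM F (gV o) i j) →
      Desc o (body i (gL o i) g j) (mixRM F (gV o) i (j + 1))) :
    Desc o ((List.range o.length).foldl (fun g i =>
        (List.range (gRow g i).length).foldl (body i (gRow g i).length) g) o)
      (fun x y => if x < o.length then F x y else gV o x y) := by
  have main := foldl_range_inv
    (fun g i => (List.range (gRow g i).length).foldl (body i (gRow g i).length) g)
    (fun i g => Desc o g (mixRM F (gV o) i 0)) o.length o
    (Desc_congr (Desc_init o) (fun x y _ _ => (mixRM_zero F (gV o) x y).symm))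
    ?_
  · exact Desc_congr main (fun x y hx hy => by
      unfold mixRM
      rw [if_pos (by omega), if_pos hx])
  · intro i g hi H
    dsimp only
    have hlen : (gRow g i).length = gL o i := H.2.1 i
    rw [hlen]
    have inner := foldl_range_inv (body i (gL o i))
      (fun j h => Desc o h (mixRM F (gV o) i j)) (gL o i) g H
      (fun j h hj Hh => hstep i j h hi hj Hh)
    refine Desc_congr inner ?_
    intro x y hx hy
    unfold mixRM
    by_cases hxi : x = i
    · subst hxi
      rw [if_pos (by omega), if_pos (by omega)]
    · by_cases hlt : x < i
      · rw [if_pos (by omega), if_pos (by omega)]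
      · rw [if_neg (by omega), if_neg (by omega)]

-- ==== A-side ====

theorem mixA_neg2 (o : List (List Int)) (i j x y : Nat) :
    mixRM (outVal o) (gV o) i j x y = -2 ↔ gV o x y = -2 := by
  unfold mixRM
  split_ifs
  · exact outVal_neg2 o x y
  · exact Iff.rfl

theorem Desc_neg2 {o g : List (List Int)} {i j : Nat}
    (H : Desc o g (mixRM (outVal o) (gV o) i j)) (x y : Nat) (hx : x < o.length) :
    gV g x y = -2 ↔ gV o x y = -2 := by
  by_cases hy : y < gL o x
  · rw [H.2.2 x y hx hy]; exact mixA_neg2 o i j x y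
  · rw [gV_oob g x y (by rw [H.2.1 x]; omega), gV_oob o x y (by omega)]
  
theorem range'_three (s : Nat) : List.range' s 3 = [s, s + 1, s + 2] := by
  simp [List.range'_succ]

theorem neighbors_mem (o g : List (List Int)) (i j : Nat)
    (H : Desc o g (mixRM (outVal o) (gV o) i j))
    (hi1 : 0 < i) (hi2 : ¬(i = 0 ∨ i = o.length - 1)) (hin : i < o.length)
    (hj1 : 0 < j) (hj2 : ¬(j = 0 ∨ j = gL o i - 1)) (hjn : j < gL o i)
    (hc : gV g i j = 0) :
    ((-2 : Int) ∈ neighbors g i j) ↔ NearNull o i j := by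
  have hglen : g.length = o.length := H.1
  have hgl : (gRow g i).length = gL o i := H.2.1 i
  have hxr : List.range' (i - 1) (min (i + 2) g.length - (i - 1)) = [i - 1, i, i + 1] := by
    rw [hglen]
    have : min (i + 2) o.length - (i - 1) = 3 := by omega
    rw [this, range'_three]
    have e1 : i - 1 + 1 = i := by omega
    have e2 : i - 1 + 2 = i + 1 := by omega
    rw [e1, e2]
  have hyr : List.range' (j - 1) (min (j + 2) (gRow g i).length - (j - 1)) = [j - 1, j, j + 1] := by
    rw [hgl]
    have : min (j + 2) (gL o i) - (j - 1) = 3 := by omega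
    rw [this, range'_three]
    have e1 : j - 1 + 1 = j := by omega
    have e2 : j - 1 + 2 = j + 1 := by omega
    rw [e1, e2]
  unfold neighbors
  dsimp only
  have hinner : ∀ (acc : List Int) (x : Nat),
      (List.range' (j - 1) (min (j + 2) (gRow g i).length - (j - 1))).foldl
        (fun out y => out ++ [gV g x y]) acc = acc ++ [j - 1, j, j + 1].map (gV g x) := by
    intro acc x
    rw [hyr, PySem.List.foldl_append_singleton_eq_map]
  have houteq : (List.range' (i - 1) (min (i + 2) g.length - (i - 1))).foldl
      (fun out x => (List.range' (j - 1) (min (j + 2) (gRow g i).length - (j - 1))).foldl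
        (fun out y => out ++ [gV g x y]) out) [] =
      [gV g (i-1) (j-1), gV g (i-1) j, gV g (i-1) (j+1),
       gV g i (j-1), gV g i j, gV g i (j+1),
       gV g (i+1) (j-1), gV g (i+1) j, gV g (i+1) (j+1)] := by
    rw [PySem.List.foldl_congr_mem _ _ (fun out x => out ++ [j - 1, j, j + 1].map (gV g x)) _
      (fun acc x _ => hinner acc x), hxr, PySem.List.foldl_append_eq_flatMap]
    simp
  rw [houteq]
  have hmem : gV g i j ∈ [gV g (i-1) (j-1), gV g (i-1) j, gV g (i-1) (j+1),
      gV g i (j-1), gV g i j, gV g i (j+1),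
      gV g (i+1) (j-1), gV g (i+1) j, gV g (i+1) (j+1)] := by simp
  rw [PySem.List.remove?_eq_some_erase _ _ hmem]
  simp only [Option.getD_some]
  rw [List.mem_erase_of_ne (by rw [hc]; decide)]
  clear hinner houteq hmem
  have bridge : ∀ x y : Nat, x < o.length → ((-2 : Int) = gV g x y ↔ gV o x y = -2) := by
    intro x y hx
    rw [eq_comm]
    exact Desc_neg2 H x y hx
  have hx1 : i - 1 < o.length := by omega
  have hx3 : i + 1 < o.length := by omega
  have b1 := bridge (i-1) (j-1) hx1
  have b2 := bridge (i-1) j hx1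
  have b3 := bridge (i-1) (j+1) hx1
  have b4 := bridge i (j-1) hin
  have b5 := bridge i j hin
  have b6 := bridge i (j+1) hin
  have b7 := bridge (i+1) (j-1) hx3
  have b8 := bridge (i+1) j hx3
  have b9 := bridge (i+1) (j+1) hx3
  simp only [List.mem_cons, List.not_mem_nil, or_false]
  rw [b1, b2, b3, b4, b5, b6, b7, b8, b9]

theorem stepA (o : List (List Int)) (i j : Nat) (g : List (List Int))
    (hi : i < o.length) (hj : j < gL o i)
    (H : Desc o g (mixRM (outVal o) (gV o) i j)) :
    Desc o (bodyA g i j) (mixRM (outVal o) (gV o) i (j + 1)) := by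
  have hval : gV g i j = gV o i j := by
    rw [H.2.2 i j hi hj, mixRM_self]
  have finish_set : ∀ hv : outVal o i j = 1,
      Desc o (gSet g i j 1) (mixRM (outVal o) (gV o) i (j + 1)) := by
    intro hv
    refine Desc_congr (Desc_gSet H i j 1 hi hj) ?_
    intro x y hx hy
    by_cases hxy : x = i ∧ y = j
    · obtain ⟨h1, h2⟩ := hxy; subst h1; subst h2
      rw [if_pos ⟨rfl, rfl⟩, mixRM_succ_self, hv]
    · rw [if_neg hxy, mixRM_succ_ne _ _ _ _ _ _ hxy]
  have finish_id : ∀ hv : outVal o i j = gV o i j,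
      Desc o g (mixRM (outVal o) (gV o) i (j + 1)) := by
    intro hv
    refine Desc_congr H ?_
    intro x y hx hy
    by_cases hxy : x = i ∧ y = j
    · obtain ⟨h1, h2⟩ := hxy; subst h1; subst h2
      rw [mixRM_succ_self, mixRM_self, hv]
    · rw [mixRM_succ_ne _ _ _ _ _ _ hxy]
  unfold bodyA
  by_cases h1 : gV g i j ≠ 0
  · rw [if_pos h1]
    exact finish_id (outVal_of_ne o i j (by rw [← hval]; exact h1))
  · rw [if_neg h1]
    push_neg at h1
    have h0 : gV o i j = 0 := by rw [← hval]; exact h1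
    have hglen : g.length = o.length := H.1
    have hgl : (gRow g i).length = gL o i := H.2.1 i
    by_cases h2 : i = 0 ∨ i = g.length - 1
    · rw [if_pos h2]
      exact finish_set (outVal_edge o i j h0 (by rw [← hglen]; tauto))
    · rw [if_neg h2]
      rw [hglen] at h2
      by_cases h3 : j = 0 ∨ j = (gRow g i).length - 1
      · rw [if_pos h3]
        rw [hgl] at h3
        exact finish_set (outVal_edge o i j h0 (by tauto))
      · rw [if_neg h3]
        rw [hgl] at h3
        have hnm := neighbors_mem o g i j H (by omega) h2 hi (by omega) h3 hj h1
        by_cases h4 : (-2 : Int) ∈ neighbors g i j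
        · rw [if_pos h4]
          refine finish_set ?_
          rw [outVal_inner o i j h0 (by tauto), if_pos (hnm.mp h4)]
        · rw [if_neg h4]
          refine finish_id ?_
          rw [outVal_inner o i j h0 (by tauto), if_neg (fun hn => h4 (hnm.mpr hn)), h0]

theorem make_boundaries_A_desc (o : List (List Int)) :
    Desc o (make_boundaries o) (fun x y => if x < o.length then outVal o x y else gV o x y) := by
  unfold make_boundaries
  exact sweep_desc o (outVal o) (fun i _ h j => bodyA h i j)
    (fun i j g hi hj H => stepA o i j g hi hj H)

-- ==== B-side ====

abbrev cheb (i j x y : Nat) : Prop := i ≤ x + 1 ∧ x ≤ i + 1 ∧ j ≤ y + 1 ∧ y ≤ j + 1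

abbrev nearIn (P : List (Nat × Nat)) (x y : Nat) : Prop := ∃ p ∈ P, cheb p.1 p.2 x y

def bVal (o : List (List Int)) (P : List (Nat × Nat)) (x y : Nat) : Int :=
  if interiorP o x y ∧ gV o x y = 0 ∧ nearIn P x y then 1 else p1Val o x y

def bVal2 (o : List (List Int)) (P : List (Nat × Nat)) (i j a b x y : Nat) : Int :=
  if interiorP o x y ∧ gV o x y = 0 ∧ (nearIn P x y ∨
      (i ≤ x + 1 ∧ x ≤ i + 1 ∧ x < o.length ∧ j ≤ y + 1 ∧ y ≤ j + 1 ∧ y < gL o x ∧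
       (x < a ∨ (x = a ∧ y < b)))) then 1 else p1Val o x y

-- pass 1

theorem stepB1 (o : List (List Int)) (i j : Nat) (g : List (List Int))
    (hi : i < o.length) (hj : j < gL o i)
    (H : Desc o g (mixRM (p1Val o) (gV o) i j)) :
    Desc o (bodyB1 o.length (gL o i) g i j) (mixRM (p1Val o) (gV o) i (j + 1)) := by
  have hval : gV g i j = gV o i j := by
    rw [H.2.2 i j hi hj, mixRM_self]
  unfold bodyB1
  rw [hval]
  by_cases hcond : gV o i j = 0 ∧ (i = 0 ∨ i = o.length - 1 ∨ j = 0 ∨ j = gL o i - 1)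
  · rw [if_pos hcond]
    refine Desc_congr (Desc_gSet H i j 1 hi hj) ?_
    intro x y hx hy
    by_cases hxy : x = i ∧ y = j
    · obtain ⟨h1, h2⟩ := hxy; subst h1; subst h2
      rw [if_pos ⟨rfl, rfl⟩, mixRM_succ_self]
      unfold p1Val
      rw [if_pos hcond]
    · rw [if_neg hxy, mixRM_succ_ne _ _ _ _ _ _ hxy]
  · rw [if_neg hcond]
    refine Desc_congr H ?_
    intro x y hx hy
    by_cases hxy : x = i ∧ y = j
    · obtain ⟨h1, h2⟩ := hxy; subst h1; subst h2
      rw [mixRM_succ_self, mixRM_self]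
      unfold p1Val
      rw [if_neg hcond]
    · rw [mixRM_succ_ne _ _ _ _ _ _ hxy]

-- pass 2: one scatter from a null at (i, j)

theorem stepB2 (o : List (List Int)) (done : List (Nat × Nat)) (i j a b : Nat)
    (g : List (List Int))
    (ha1 : i - 1 ≤ a) (ha2 : a < min (i + 2) o.length)
    (hb1 : j - 1 ≤ b) (hb2 : b < min (j + 2) (gL o a))
    (H : Desc o g (bVal2 o done i j a b)) :
    Desc o (bodyB2 o.length (gL o a) g a b) (bVal2 o done i j a (b + 1)) := by
  have hao : a < o.length := by omega
  have hbo : b < gL o a := by omega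
  have hval := H.2.2 a b hao hbo
  have hS_new : (i ≤ a + 1 ∧ a ≤ i + 1 ∧ a < o.length ∧ j ≤ b + 1 ∧ b ≤ j + 1 ∧ b < gL o a ∧
      (a < a ∨ (a = a ∧ b < b + 1))) := by omega
  have congr_ne : ∀ x y, ¬(x = a ∧ y = b) →
      bVal2 o done i j a (b + 1) x y = bVal2 o done i j a b x y := by
    intro x y hxy
    unfold bVal2
    by_cases hx : x = a
    · subst hx
      have hyb : y ≠ b := fun h => hxy ⟨rfl, h⟩
      by_cases hc : interiorP o x y ∧ gV o x y = 0 ∧ (nearIn done x y ∨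
          (i ≤ x + 1 ∧ x ≤ i + 1 ∧ x < o.length ∧ j ≤ y + 1 ∧ y ≤ j + 1 ∧ y < gL o x ∧
           (x < x ∨ (x = x ∧ y < b)))) <;>
        by_cases hc' : interiorP o x y ∧ gV o x y = 0 ∧ (nearIn done x y ∨
          (i ≤ x + 1 ∧ x ≤ i + 1 ∧ x < o.length ∧ j ≤ y + 1 ∧ y ≤ j + 1 ∧ y < gL o x ∧
           (x < x ∨ (x = x ∧ y < b + 1)))) <;>
        first
        | (rw [if_pos hc', if_pos hc])
        | (rw [if_neg hc', if_neg hc])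
        | (exfalso; obtain ⟨p1, p2, p3⟩ := hc; refine hc' ⟨p1, p2, ?_⟩;
           rcases p3 with p3 | p3; exact Or.inl p3; right; omega)
        | (exfalso; obtain ⟨p1, p2, p3⟩ := hc'; refine hc ⟨p1, p2, ?_⟩;
           rcases p3 with p3 | p3; exact Or.inl p3; right; omega)
    · by_cases hc : interiorP o x y ∧ gV o x y = 0 ∧ (nearIn done x y ∨
          (i ≤ x + 1 ∧ x ≤ i + 1 ∧ x < o.length ∧ j ≤ y + 1 ∧ y ≤ j + 1 ∧ y < gL o x ∧
           (x < a ∨ (x = a ∧ y < b)))) <;>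
        by_cases hc' : interiorP o x y ∧ gV o x y = 0 ∧ (nearIn done x y ∨
          (i ≤ x + 1 ∧ x ≤ i + 1 ∧ x < o.length ∧ j ≤ y + 1 ∧ y ≤ j + 1 ∧ y < gL o x ∧
           (x < a ∨ (x = a ∧ y < b + 1)))) <;>
        first
        | (rw [if_pos hc', if_pos hc])
        | (rw [if_neg hc', if_neg hc])
        | (exfalso; obtain ⟨p1, p2, p3⟩ := hc; refine hc' ⟨p1, p2, ?_⟩;
           rcases p3 with p3 | p3; exact Or.inl p3; right; omega)
        | (exfalso; obtain ⟨p1, p2, p3⟩ := hc'; refine hc ⟨p1, p2, ?_⟩;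
           rcases p3 with p3 | p3; exact Or.inl p3; right; omega)
  unfold bodyB2
  by_cases hguard : gV g a b = 0 ∧ 0 < a ∧ a < o.length - 1 ∧ 0 < b ∧ b < gL o a - 1
  · rw [if_pos hguard]
    have hint : interiorP o a b := ⟨hguard.2.1, hguard.2.2.1, hguard.2.2.2.1, hguard.2.2.2.2⟩
    have h0 : gV o a b = 0 := by
      have := hguard.1
      rw [hval] at this
      unfold bVal2 at this
      split_ifs at this with hc
      · exact absurd this (by decide)
      · rwa [p1Val_interior o a b hint] at this
    refine Desc_congr (Desc_gSet H a b 1 hao hbo) ?_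
    intro x y hx hy
    by_cases hxy : x = a ∧ y = b
    · obtain ⟨h1', h2'⟩ := hxy; subst h1'; subst h2'
      rw [if_pos ⟨rfl, rfl⟩]
      unfold bVal2
      rw [if_pos ⟨hint, h0, Or.inr hS_new⟩]
    · rw [if_neg hxy]
      exact (congr_ne x y hxy).symm
  · rw [if_neg hguard]
    refine Desc_congr H ?_
    intro x y hx hy
    by_cases hxy : x = a ∧ y = b
    · obtain ⟨h1', h2'⟩ := hxy; subst h1'; subst h2'
      by_cases hint : interiorP o x y
      · by_cases h0 : gV o x y = 0
        · -- the cell is empty interior but the guard failed, so it already holds 1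
          have hne : gV g x y ≠ 0 := fun hz =>
            hguard ⟨hz, hint.1, hint.2.1, hint.2.2.1, hint.2.2.2⟩
          rw [hval] at hne
          have hp1 : p1Val o x y = 0 := by rw [p1Val_interior o x y hint]; exact h0
          unfold bVal2 at hne ⊢
          split_ifs at hne with hc
          · rw [if_pos hc, if_pos ⟨hint, h0, Or.inr hS_new⟩]
          · exact absurd hp1 hne
        · unfold bVal2
          rw [if_neg (by rintro ⟨-, hz, -⟩; exact h0 hz),
            if_neg (by rintro ⟨-, hz, -⟩; exact h0 hz)]
      · unfold bVal2
        rw [if_neg (fun h => hint h.1), if_neg (fun h => hint h.1)]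
    · rw [(congr_ne x y hxy).symm]
  
-- the two stages of B, named (definitionally equal to make_boundaries_alt's lets)
def pass1 (o : List (List Int)) : List (List Int) :=
  (List.range o.length).foldl (fun g i =>
    (List.range (gRow g i).length).foldl (fun h j => bodyB1 o.length (gRow g i).length h i j) g) o

def nullsOf (o : List (List Int)) : List (Nat × Nat) :=
  (List.range o.length).flatMap (fun i =>
    (List.range (gRow (pass1 o) i).length).filterMap
      (fun j => if gV (pass1 o) i j = -2 then some (i, j) else none))

theorem alt_eq (o : List (List Int)) :
    make_boundaries_alt o = (nullsOf o).foldl (fun g p => scatter o.length g p.1 p.2) (pass1 o) := rfl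

theorem pass1_desc (o : List (List Int)) :
    Desc o (pass1 o) (fun x y => if x < o.length then p1Val o x y else gV o x y) :=
  sweep_desc o (p1Val o) (fun i m h j => bodyB1 o.length m h i j)
    (fun i j g hi hj H => stepB1 o i j g hi hj H)

theorem mem_nullsOf (o : List (List Int)) (a b : Nat) :
    (a, b) ∈ nullsOf o ↔ a < o.length ∧ b < gL o a ∧ gV o a b = -2 := by
  have Hg1 := pass1_desc o
  unfold nullsOf
  simp only [List.mem_flatMap, List.mem_filterMap, List.mem_range]
  constructor
  · rintro ⟨i, hi, j, hj, hif⟩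
    split_ifs at hif with hv
    · obtain ⟨rfl, rfl⟩ : i = a ∧ j = b := by
        injection hif with h; exact ⟨congrArg Prod.fst h, congrArg Prod.snd h⟩
      have hj' : j < gL o i := by rw [← Hg1.2.1 i]; exact hj
      refine ⟨hi, hj', ?_⟩
      have h2 := Hg1.2.2 i j hi hj'
      simp only [hi, if_true] at h2
      rw [h2] at hv
      exact (p1Val_neg2 o i j).mp hv
  · rintro ⟨ha, hb, hv⟩
    refine ⟨a, ha, b, by rw [show (gRow (pass1 o) a).length = gL o a from Hg1.2.1 a]; exact hb, ?_⟩
    have h2 := Hg1.2.2 a b ha hb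
    simp only [ha, if_true] at h2
    rw [if_pos (by rw [h2]; exact (p1Val_neg2 o a b).mpr hv)]

theorem nearIn_append (done : List (Nat × Nat)) (i j x y : Nat) :
    nearIn (done ++ [(i, j)]) x y ↔ nearIn done x y ∨ cheb i j x y := by
  constructor
  · rintro ⟨p, hp, hc⟩
    rcases List.mem_append.mp hp with h | h
    · exact Or.inl ⟨p, h, hc⟩
    · simp only [List.mem_singleton] at h
      subst h
      exact Or.inr hc
  · rintro (⟨p, hp, hc⟩ | hc)
    · exact ⟨p, List.mem_append.mpr (Or.inl hp), hc⟩
    · exact ⟨(i, j), List.mem_append.mpr (Or.inr (by simp)), hc⟩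

theorem scatter_desc (o : List (List Int)) (done : List (Nat × Nat)) (i j : Nat)
    (g : List (List Int)) (hi : i < o.length) (H : Desc o g (bVal o done)) :
    Desc o (scatter o.length g i j) (bVal o (done ++ [(i, j)])) := by
  unfold scatter
  have start : Desc o g (bVal2 o done i j (i - 1) (j - 1)) := by
    refine Desc_congr H ?_
    intro x y hx hy
    unfold bVal bVal2
    refine if_congr (and_congr_right fun _ => and_congr_right fun _ => ?_) rfl rfl
    constructor
    · exact Or.inl
    · rintro (h | h)
      · exact h
      · exact absurd h (by omega)
  have main := foldl_range'_inv
    (fun g x => (List.range' (j - 1) (min (j + 2) (gRow g x).length - (j - 1))).foldl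
      (fun h y => bodyB2 o.length (gRow g x).length h x y) g)
    (fun a g => Desc o g (bVal2 o done i j a (j - 1)))
    (min (i + 2) o.length - (i - 1)) (i - 1) g start ?_
  · have e : i - 1 + (min (i + 2) o.length - (i - 1)) = min (i + 2) o.length := by omega
    rw [e] at main
    refine Desc_congr main ?_
    intro x y hx hy
    unfold bVal bVal2
    refine if_congr (and_congr_right fun _ => and_congr_right fun _ => ?_) rfl rfl
    rw [nearIn_append]
    constructor
    · rintro (h | h)
      · exact Or.inl h
      · exact Or.inr ⟨by omega, by omega, by omega, by omega⟩
    · rintro (h | h)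
      · exact Or.inl h
      · exact Or.inr ⟨by omega, by omega, hx, by omega, by omega, hy, by omega⟩
  · intro a g' ha1 ha2 Ha
    dsimp only
    have hao : a < o.length := by omega
    have hm : (gRow g' a).length = gL o a := Ha.2.1 a
    rw [hm]
    have inner := foldl_range'_inv (fun h y => bodyB2 o.length (gL o a) h a y)
      (fun b h => Desc o h (bVal2 o done i j a b))
      (min (j + 2) (gL o a) - (j - 1)) (j - 1) g' Ha
      (fun b h hb1 hb2 Hb => stepB2 o done i j a b h (by omega) (by omega) hb1 (by omega) Hb)
    refine Desc_congr inner ?_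
    intro x y hx hy
    unfold bVal2
    refine if_congr (and_congr_right fun _ => and_congr_right fun _ =>
      or_congr_right ?_) rfl rfl
    by_cases hxa : x = a
    · subst hxa
      constructor
      · rintro ⟨c1, c2, c3, c4, c5, c6, c7⟩
        exact ⟨c1, c2, c3, c4, c5, c6, by omega⟩
      · rintro ⟨c1, c2, c3, c4, c5, c6, c7⟩
        exact ⟨c1, c2, c3, c4, c5, c6, by omega⟩
    · constructor
      · rintro ⟨c1, c2, c3, c4, c5, c6, c7⟩
        exact ⟨c1, c2, c3, c4, c5, c6, by omega⟩
      · rintro ⟨c1, c2, c3, c4, c5, c6, c7⟩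
        exact ⟨c1, c2, c3, c4, c5, c6, by omega⟩

theorem near_iff (o : List (List Int)) (x y : Nat) :
    NearNull o x y ↔ nearIn (nullsOf o) x y := by
  constructor
  · intro h
    have pick : ∀ a b : Nat, gV o a b = -2 → a ≤ x + 1 → x ≤ a + 1 → b ≤ y + 1 → y ≤ b + 1 →
        nearIn (nullsOf o) x y := by
      intro a b hv c1 c2 c3 c4
      have hbd := gV_ne_zero_bounds o a b (by rw [hv]; decide)
      exact ⟨(a, b), (mem_nullsOf o a b).mpr ⟨hbd.1, hbd.2, hv⟩, c1, c2, c3, c4⟩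
    rcases h with h | h | h | h | h | h | h | h | h
    · exact pick (x-1) (y-1) h (by omega) (by omega) (by omega) (by omega)
    · exact pick (x-1) y h (by omega) (by omega) (by omega) (by omega)
    · exact pick (x-1) (y+1) h (by omega) (by omega) (by omega) (by omega)
    · exact pick x (y-1) h (by omega) (by omega) (by omega) (by omega)
    · exact pick x y h (by omega) (by omega) (by omega) (by omega)
    · exact pick x (y+1) h (by omega) (by omega) (by omega) (by omega)
    · exact pick (x+1) (y-1) h (by omega) (by omega) (by omega) (by omega)
    · exact pick (x+1) y h (by omega) (by omega) (by omega) (by omega)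
    · exact pick (x+1) (y+1) h (by omega) (by omega) (by omega) (by omega)
  · rintro ⟨⟨a, b⟩, hp, c1, c2, c3, c4⟩
    obtain ⟨ha, hb, hv⟩ := (mem_nullsOf o a b).mp hp
    have hx3 : a = x - 1 ∨ a = x ∨ a = x + 1 := by omega
    have hy3 : b = y - 1 ∨ b = y ∨ b = y + 1 := by omega
    rcases hx3 with rfl | rfl | rfl <;> rcases hy3 with rfl | rfl | rfl <;> tauto

theorem make_boundaries_B_desc (o : List (List Int)) :
    Desc o (make_boundaries_alt o) (fun x y => if x < o.length then outVal o x y else gV o x y) := by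
  rw [alt_eq]
  have h0 : Desc o (pass1 o) (bVal o []) := by
    refine Desc_congr (pass1_desc o) ?_
    intro x y hx hy
    rw [if_pos hx]
    unfold bVal
    rw [if_neg (by rintro ⟨-, -, p, hp, -⟩; simp at hp)]
  have main := foldl_mem_inv (nullsOf o) (fun g p => scatter o.length g p.1 p.2)
    (fun done g => Desc o g (bVal o done))
    (fun done p g hmem H => by
      have := (mem_nullsOf o p.1 p.2).mp (by simpa using hmem)
      exact scatter_desc o done p.1 p.2 g this.1 H)
    (nullsOf o) [] (pass1 o) (fun x hx => hx) h0
  simp only [List.nil_append] at main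
  refine Desc_congr main ?_
  intro x y hx hy
  rw [if_pos hx]
  by_cases h0' : gV o x y = 0
  · by_cases he : x = 0 ∨ x = o.length - 1 ∨ y = 0 ∨ y = gL o x - 1
    · rw [outVal_edge o x y h0' he]
      unfold bVal
      rw [if_neg (by rintro ⟨hint, -, -⟩; omega)]
      unfold p1Val
      rw [if_pos ⟨h0', he⟩]
    · have hint : interiorP o x y := by omega
      rw [outVal_inner o x y h0' he]
      unfold bVal
      by_cases hn : NearNull o x y
      · rw [if_pos ⟨hint, h0', (near_iff o x y).mp hn⟩, if_pos hn]
      · rw [if_neg (fun h => hn ((near_iff o x y).mpr h.2.2)), if_neg hn,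
          p1Val_interior o x y hint, h0']
  · rw [outVal_of_ne o x y h0']
    unfold bVal
    rw [if_neg (by rintro ⟨-, hz, -⟩; exact h0' hz)]
    unfold p1Val
    rw [if_neg (by rintro ⟨hz, -⟩; exact h0' hz)]

-- ===== VERDICT (by name: the statement is the Claim_ definition above) =====
theorem make_boundaries_spec : Claim_equal_make_boundaries := by
  intro o _ _
  unfold Spec_make_boundaries
  exact Desc_unique o _ _ _ (make_boundaries_A_desc o) (make_boundaries_B_desc o)
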